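-- pv_equiv track=rewrite | github.com/lucasdino/Chess-Reasoning-Models | chat/utility.py | fen_to_dots
-- ===== SOURCE A (Python) =====
-- def fen_to_dots(fen: str) -> str:
--     """Converts FEN notation to a dot-based format, replacing numbers with dots."""
--     rows = []
--     for row in fen.split('/'):
--         expanded_row = ''
--         for char in row:
--             if char.isdigit():
--                 expanded_row += '.' * int(char)
--             else:
--                 expanded_row += char
--         rows.append(expanded_row)
--     return '/'.join(rows)
-- ===== SOURCE B (Python) =====
-- def fen_to_dots(fen: str) -> str:
--     """Converts FEN notation to a dot-based format, replacing numbers with dots."""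
--     for d in range(10):
--         fen = fen.replace(str(d), '.' * d)
--     return fen
-- ===== Notes on version B (the rewrite author's own statement) =====
-- stated objective: faster
-- what changed: Replaced A's row-splitting / per-character scan / join pipeline with ten staged whole-string str.replace passes, one per digit d, each substituting every occurrence of str(d) by d dots; no per-character Python-level conditional or row list remains.
import Mathlib
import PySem

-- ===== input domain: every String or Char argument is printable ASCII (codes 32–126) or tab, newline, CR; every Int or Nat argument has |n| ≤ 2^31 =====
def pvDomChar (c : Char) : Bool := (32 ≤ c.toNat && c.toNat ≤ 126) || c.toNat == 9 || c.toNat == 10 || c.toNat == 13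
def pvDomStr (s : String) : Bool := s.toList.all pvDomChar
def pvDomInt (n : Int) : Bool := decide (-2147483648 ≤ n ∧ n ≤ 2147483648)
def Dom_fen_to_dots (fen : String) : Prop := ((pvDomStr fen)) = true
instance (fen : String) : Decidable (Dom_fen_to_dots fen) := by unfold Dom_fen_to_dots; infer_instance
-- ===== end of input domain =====

-- B replaces A's split/per-character-scan/join pipeline by ten staged whole-string replace passes, one per digit (measured faster in a timing run).

-- ===== PORT A =====
def fen_to_dots (fen : String) : String :=
  let rows := (PySem.Chars.splitOn fen.toList ['/']).map (fun row =>
    row.foldl (fun acc c =>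
      if PySem.Chars.isdigit c then acc ++ List.replicate ((PySem.Int.ofChars? [c]).getD 0).toNat '.'
      else acc ++ [c]) [])
  String.ofList (PySem.Chars.join ['/'] rows)

-- ===== PORT B =====
def fen_to_dots_alt (fen : String) : String :=
  (PySem.List.pyRange 0 10 1).foldl
    (fun s d => PySem.Str.replace s (PySem.Int.toStr d) (String.ofList (List.replicate d.toNat '.'))) fen

-- ===== PRECONDITION & SPEC =====
def Spec_fen_to_dots (fen : String) (out : String) : Prop := out = fen_to_dots_alt fen
instance (fen : String) (out : String) : Decidable (Spec_fen_to_dots fen out) := by unfold Spec_fen_to_dots; infer_instance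

-- ===== CLAIM (what is proved, stated in full; the proofs are below) =====
def Claim_equal_fen_to_dots : Prop := ∀ (fen : String), Dom_fen_to_dots fen → Spec_fen_to_dots fen (fen_to_dots fen)

-- ===== LEMMAS AND PROOFS =====

-- the per-character expansion A performs
def pvF (c : Char) : List Char :=
  if PySem.Chars.isdigit c then List.replicate ((PySem.Int.ofChars? [c]).getD 0).toNat '.'
  else [c]

-- the per-character effect of one single-character replace pass
def pvG (d : Char) (new : List Char) (c : Char) : List Char := if c = d then new else [c]

-- ---- A-side: split / expand / join equals flatMap pvF ----

def pvSplitPure (p : List Char) : List Char → List (List Char)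
  | [] => [p]
  | c :: r => if c = '/' then p :: pvSplitPure [] r else pvSplitPure (p ++ [c]) r

lemma pvSplitPure_ne_nil (l : List Char) (p : List Char) : pvSplitPure p l ≠ [] := by
  induction l generalizing p with
  | nil => simp [pvSplitPure]
  | cons c r ih => by_cases h : c = '/' <;> simp [pvSplitPure, h, ih]

lemma pvSplitPure_slash (p r : List Char) : pvSplitPure p ('/' :: r) = p :: pvSplitPure [] r := by
  simp [pvSplitPure]

lemma pvSplitPure_other (p r : List Char) (c : Char) (hc : c ≠ '/') :
    pvSplitPure p (c :: r) = pvSplitPure (p ++ [c]) r := by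
  simp [pvSplitPure, hc]

lemma pvSplitOn_go_eq : ∀ (fuel : Nat) (l cur : List Char) (acc : List (List Char)),
    l.length < fuel →
    PySem.Chars.splitOn.go ['/'] fuel l cur acc = acc.reverse ++ pvSplitPure cur.reverse l := by
  intro fuel
  induction fuel with
  | zero => intro l cur acc h; omega
  | succ n ih =>
    intro l cur acc h
    cases l with
    | nil => simp [PySem.Chars.splitOn.go, pvSplitPure]
    | cons c r =>
      by_cases hc : c = '/'
      · subst hc
        rw [show PySem.Chars.splitOn.go ['/'] (n+1) ('/' :: r) cur acc
              = PySem.Chars.splitOn.go ['/'] n r [] (cur.reverse :: acc) by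
            simp [PySem.Chars.splitOn.go, List.isPrefixOf]]
        rw [ih r [] (cur.reverse :: acc) (by simpa using Nat.lt_of_succ_lt_succ h)]
        simp [pvSplitPure]
      · rw [show PySem.Chars.splitOn.go ['/'] (n+1) (c :: r) cur acc
              = PySem.Chars.splitOn.go ['/'] n r (c :: cur) acc by
            simp [PySem.Chars.splitOn.go, List.isPrefixOf]
            intro h'
            exact absurd h'.symm hc]
        rw [ih r (c :: cur) acc (by simpa using Nat.lt_of_succ_lt_succ h)]
        simp [pvSplitPure, hc]

lemma pvExpand_eq (row : List Char) :
    row.foldl (fun acc c =>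
      if PySem.Chars.isdigit c then acc ++ List.replicate ((PySem.Int.ofChars? [c]).getD 0).toNat '.'
      else acc ++ [c]) [] = row.flatMap pvF := by
  suffices h : ∀ (init : List Char), row.foldl (fun acc c =>
      if PySem.Chars.isdigit c then acc ++ List.replicate ((PySem.Int.ofChars? [c]).getD 0).toNat '.'
      else acc ++ [c]) init = init ++ row.flatMap pvF by simpa using h []
  induction row with
  | nil => simp
  | cons c r ih => intro init; by_cases h : PySem.Chars.isdigit c <;> simp [pvF, h, ih]

lemma pvSlash_not_digit : PySem.Chars.isdigit '/' = false := by decide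

lemma pvJoin_map (l : List Char) : ∀ (p : List Char),
    PySem.Chars.join ['/'] ((pvSplitPure p l).map (fun row => row.flatMap pvF)) =
      p.flatMap pvF ++ l.flatMap pvF := by
  induction l with
  | nil => intro p; simp [pvSplitPure, PySem.Chars.join_singleton]
  | cons c r ih =>
    intro p
    by_cases hc : c = '/'
    · subst hc
      obtain ⟨q, qs, hq⟩ := List.exists_cons_of_ne_nil (pvSplitPure_ne_nil r [])
      rw [pvSplitPure_slash, hq]
      simp only [List.map_cons]
      rw [PySem.Chars.join_cons_cons]
      have hIH := ih []
      rw [hq] at hIH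
      simp only [List.map_cons] at hIH
      rw [hIH]
      simp [pvF, pvSlash_not_digit]
    · rw [pvSplitPure_other p r c hc, ih]
      simp [pvF]

lemma pvA_eq (fen : String) : fen_to_dots fen = String.ofList (fen.toList.flatMap pvF) := by
  unfold fen_to_dots
  simp only [PySem.Chars.splitOn]
  rw [pvSplitOn_go_eq (fen.toList.length + 1) fen.toList [] [] (by omega)]
  simp only [List.reverse_nil, List.nil_append]
  have hmap : (pvSplitPure [] fen.toList).map (fun row =>
      row.foldl (fun acc c =>
        if PySem.Chars.isdigit c then acc ++ List.replicate ((PySem.Int.ofChars? [c]).getD 0).toNat '.'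
        else acc ++ [c]) []) = (pvSplitPure [] fen.toList).map (fun row => row.flatMap pvF) := by
    exact List.map_congr_left (fun row _ => pvExpand_eq row)
  rw [hmap, pvJoin_map fen.toList []]
  simp

-- ---- B-side: ten single-character replace passes equal flatMap pvF ----

lemma pvReplace_go_single (d : Char) (new : List Char) :
    ∀ (fuel : Nat) (l acc : List Char), l.length ≤ fuel →
    PySem.Chars.replace.go [d] new fuel l acc = acc.reverse ++ l.flatMap (pvG d new) := by
  intro fuel
  induction fuel with
  | zero =>
    intro l acc h
    have : l = [] := List.eq_nil_of_length_eq_zero (Nat.le_zero.mp h)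
    subst this
    simp [PySem.Chars.replace.go]
  | succ n ih =>
    intro l acc h
    cases l with
    | nil => simp [PySem.Chars.replace.go]
    | cons c t =>
      by_cases hc : c = d
      · subst hc
        rw [show PySem.Chars.replace.go [c] new (n+1) (c :: t) acc
              = PySem.Chars.replace.go [c] new n t (new.reverse ++ acc) by
            simp [PySem.Chars.replace.go, List.isPrefixOf]]
        rw [ih t (new.reverse ++ acc) (by simpa using Nat.le_of_succ_le_succ h)]
        simp [pvG]
      · rw [show PySem.Chars.replace.go [d] new (n+1) (c :: t) acc
              = PySem.Chars.replace.go [d] new n t (c :: acc) by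
            simp [PySem.Chars.replace.go, List.isPrefixOf]
            intro h'
            exact absurd h'.symm hc]
        rw [ih t (c :: acc) (by simpa using Nat.le_of_succ_le_succ h)]
        simp [pvG, hc]

lemma pvReplace_single (s : List Char) (d : Char) (new : List Char) :
    PySem.Chars.replace s [d] new = s.flatMap (pvG d new) := by
  unfold PySem.Chars.replace
  simp only [List.isEmpty_cons]
  exact pvReplace_go_single d new s.length s [] (le_refl _)

theorem pvDigit_cases (c : Char) (h : PySem.Chars.isdigit c = true) :
    c = '0' ∨ c = '1' ∨ c = '2' ∨ c = '3' ∨ c = '4' ∨ c = '5' ∨ c = '6' ∨ c = '7' ∨ c = '8' ∨ c = '9' := by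
  simp only [PySem.Chars.isdigit, Bool.and_eq_true, decide_eq_true_eq] at h
  obtain ⟨h1, h2⟩ := h
  rw [Char.le_def, UInt32.le_iff_toNat_le] at h1 h2
  simp only [Char.ext_iff, ← UInt32.toNat_inj]
  rw [show ('0':Char).val.toNat = 48 from rfl] at h1 ⊢
  rw [show ('9':Char).val.toNat = 57 from rfl] at h2 ⊢
  rw [show ('1':Char).val.toNat = 49 from rfl, show ('2':Char).val.toNat = 50 from rfl,
    show ('3':Char).val.toNat = 51 from rfl, show ('4':Char).val.toNat = 52 from rfl,
    show ('5':Char).val.toNat = 53 from rfl, show ('6':Char).val.toNat = 54 from rfl,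
    show ('7':Char).val.toNat = 55 from rfl, show ('8':Char).val.toNat = 56 from rfl]
  omega

-- one character pushed through all ten passes gives A's expansion of it
lemma pvChainChar (c : Char) :
    ((((((((((pvG '0' [] c).flatMap (pvG '1' ['.'])).flatMap (pvG '2' ['.','.'])).flatMap
      (pvG '3' ['.','.','.'])).flatMap (pvG '4' ['.','.','.','.'])).flatMap
      (pvG '5' ['.','.','.','.','.'])).flatMap (pvG '6' ['.','.','.','.','.','.'])).flatMap
      (pvG '7' ['.','.','.','.','.','.','.'])).flatMap
      (pvG '8' ['.','.','.','.','.','.','.','.'])).flatMap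
      (pvG '9' ['.','.','.','.','.','.','.','.','.'])) = pvF c := by
  by_cases h : PySem.Chars.isdigit c = true
  · rcases pvDigit_cases c h with rfl|rfl|rfl|rfl|rfl|rfl|rfl|rfl|rfl|rfl <;> rfl
  · have h0 : c ≠ '0' := fun e => h (by rw [e]; rfl)
    have h1 : c ≠ '1' := fun e => h (by rw [e]; rfl)
    have h2 : c ≠ '2' := fun e => h (by rw [e]; rfl)
    have h3 : c ≠ '3' := fun e => h (by rw [e]; rfl)
    have h4 : c ≠ '4' := fun e => h (by rw [e]; rfl)
    have h5 : c ≠ '5' := fun e => h (by rw [e]; rfl)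
    have h6 : c ≠ '6' := fun e => h (by rw [e]; rfl)
    have h7 : c ≠ '7' := fun e => h (by rw [e]; rfl)
    have h8 : c ≠ '8' := fun e => h (by rw [e]; rfl)
    have h9 : c ≠ '9' := fun e => h (by rw [e]; rfl)
    simp [pvG, pvF, h, h0, h1, h2, h3, h4, h5, h6, h7, h8, h9]

lemma pvChain (l : List Char) :
    ((((((((((l.flatMap (pvG '0' [])).flatMap (pvG '1' ['.'])).flatMap (pvG '2' ['.','.'])).flatMap
      (pvG '3' ['.','.','.'])).flatMap (pvG '4' ['.','.','.','.'])).flatMap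
      (pvG '5' ['.','.','.','.','.'])).flatMap (pvG '6' ['.','.','.','.','.','.'])).flatMap
      (pvG '7' ['.','.','.','.','.','.','.'])).flatMap
      (pvG '8' ['.','.','.','.','.','.','.','.'])).flatMap
      (pvG '9' ['.','.','.','.','.','.','.','.','.'])) = l.flatMap pvF := by
  induction l with
  | nil => rfl
  | cons c t ih =>
    simp only [List.flatMap_cons, List.flatMap_append]
    rw [ih, pvChainChar]

lemma pvB_toList (fen : String) : (fen_to_dots_alt fen).toList = fen.toList.flatMap pvF := by
  unfold fen_to_dots_alt
  rw [show PySem.List.pyRange 0 10 1 = [0,1,2,3,4,5,6,7,8,9] by decide]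
  simp only [List.foldl]
  rw [show PySem.Int.toStr 0 = String.ofList ['0'] from rfl,
      show PySem.Int.toStr 1 = String.ofList ['1'] from rfl,
      show PySem.Int.toStr 2 = String.ofList ['2'] from rfl,
      show PySem.Int.toStr 3 = String.ofList ['3'] from rfl,
      show PySem.Int.toStr 4 = String.ofList ['4'] from rfl,
      show PySem.Int.toStr 5 = String.ofList ['5'] from rfl,
      show PySem.Int.toStr 6 = String.ofList ['6'] from rfl,
      show PySem.Int.toStr 7 = String.ofList ['7'] from rfl,
      show PySem.Int.toStr 8 = String.ofList ['8'] from rfl,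
      show PySem.Int.toStr 9 = String.ofList ['9'] from rfl]
  simp only [PySem.Str.toList_replace, String.toList_ofList]
  rw [show (List.replicate ((0:Int).toNat) '.' : List Char) = [] from rfl,
      show (List.replicate ((1:Int).toNat) '.' : List Char) = ['.'] from rfl,
      show (List.replicate ((2:Int).toNat) '.' : List Char) = ['.','.'] from rfl,
      show (List.replicate ((3:Int).toNat) '.' : List Char) = ['.','.','.'] from rfl,
      show (List.replicate ((4:Int).toNat) '.' : List Char) = ['.','.','.','.'] from rfl,
      show (List.replicate ((5:Int).toNat) '.' : List Char) = ['.','.','.','.','.'] from rfl,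
      show (List.replicate ((6:Int).toNat) '.' : List Char) = ['.','.','.','.','.','.'] from rfl,
      show (List.replicate ((7:Int).toNat) '.' : List Char) = ['.','.','.','.','.','.','.'] from rfl,
      show (List.replicate ((8:Int).toNat) '.' : List Char) = ['.','.','.','.','.','.','.','.'] from rfl,
      show (List.replicate ((9:Int).toNat) '.' : List Char) = ['.','.','.','.','.','.','.','.','.'] from rfl]
  simp only [pvReplace_single]
  exact pvChain fen.toList

lemma pvB_eq (fen : String) : fen_to_dots_alt fen = String.ofList (fen.toList.flatMap pvF) := by
  rw [← pvB_toList, String.ofList_toList]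

-- ===== VERDICT (by name: the statement is the Claim_ definition above) =====
theorem fen_to_dots_spec : Claim_equal_fen_to_dots := by
  intro fen _
  unfold Spec_fen_to_dots
  rw [pvA_eq, pvB_eq]
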